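-- pv_equiv track=rewrite | github.com/0dyk/algorithm | 프로그래머스/1/340198. ［PCCE 기출문제］ 10번 ／ 공원/［PCCE 기출문제］ 10번 ／ 공원.py | solution
-- ===== SOURCE A (Python) =====
-- def solution(mats, park):
--     n = len(park)
--     m = len(park[0])
--     dp = [[0] * m for _ in range(n)]
--     max_square_size = 0
--
--     # Calculate max square size at each position
--     for i in range(n):
--         for j in range(m):
--             if park[i][j] == '-1':
--                 if i == 0 or j == 0:
--                     dp[i][j] = 1
--                 else:
--                     dp[i][j] = min(dp[i-1][j], dp[i][j-1], dp[i-1][j-1]) + 1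
--                 max_square_size = max(max_square_size, dp[i][j])
--
--     # Determine the largest mat size that can be placed
--     max_mat_size = -1
--     for mat in mats:
--         if mat <= max_square_size:
--             max_mat_size = max(max_mat_size, mat)
--
--     return max_mat_size
-- ===== SOURCE B (Python) =====
-- def solution(mats, park):
--     # Prefix-sum approach: no largest-square DP. S[i][j] counts available ('-1')
--     # cells among the first i rows restricted to their first j columns; a square of
--     # side s fits iff some s x s window has sum s*s. Sides are tried ascending
--     # (a side s+1 square contains a side s square, so the first failure is final).
--     m = len(park[0])
--     S = [[0] * (m + 1)]
--     for row in park: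
--         prev = S[-1]
--         cur = [0]
--         for j in range(m):
--             cur.append(cur[-1] + (1 if row[j] == '-1' else 0))
--         S.append([p + c for p, c in zip(prev, cur)])
--     n = len(park)
--
--     def fits(s):
--         for i in range(s, n + 1):
--             for j in range(s, m + 1):
--                 if S[i][j] - S[i - s][j] - S[i][j - s] + S[i - s][j - s] == s * s:
--                     return True
--         return False
--
--     best, s = 0, 1
--     while s <= min(n, m) and fits(s):
--         best, s = s, s + 1
--
--     ans = -1
--     for mat in mats:
--         if ans < mat <= best:
--             ans = mat
--     return ans
-- ===== Notes on version B (the rewrite author's own statement) =====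
-- stated objective: alternative
-- what changed: B drops A's largest-square DP recurrence entirely: it builds a 2D prefix-sum table of available cells and finds the maximal fitting square by testing candidate sides ascending, checking each side with O(1) window sums (window sum == s*s iff the square is fully available); the mat selection is a single strict-improvement pass.
import Mathlib
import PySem

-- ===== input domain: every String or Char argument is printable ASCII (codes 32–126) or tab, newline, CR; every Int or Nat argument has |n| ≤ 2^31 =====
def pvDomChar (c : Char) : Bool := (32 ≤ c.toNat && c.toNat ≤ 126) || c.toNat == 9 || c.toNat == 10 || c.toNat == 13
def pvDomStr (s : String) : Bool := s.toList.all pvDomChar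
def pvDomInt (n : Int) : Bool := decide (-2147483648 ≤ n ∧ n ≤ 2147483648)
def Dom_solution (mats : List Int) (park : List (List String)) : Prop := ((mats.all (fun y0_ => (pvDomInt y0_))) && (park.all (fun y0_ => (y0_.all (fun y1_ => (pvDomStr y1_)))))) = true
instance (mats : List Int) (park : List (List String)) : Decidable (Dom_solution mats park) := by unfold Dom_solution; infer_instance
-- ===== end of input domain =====

-- B replaces A's largest-square DP by a 2D prefix-sum table of available cells plus a direct
-- square search (a side-s square fits iff some s×s window sums to s*s, tried ascending);
-- neither side mutates its arguments.

-- ===== PORT A =====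
-- inner-loop body: 'if park[i][j] == "-1": dp[i][j] = …; max_square_size = max(…)'
def aStep (park : List (List String)) (i : Nat) (st : List (List Int) × Int) (j : Nat) : List (List Int) × Int :=
  if (park.getD i []).getD j "" = "-1" then
    let v : Int :=
      if i = 0 ∨ j = 0 then 1
      else min (min ((st.1.getD (i-1) []).getD j 0) ((st.1.getD i []).getD (j-1) 0))
               ((st.1.getD (i-1) []).getD (j-1) 0) + 1
    (st.1.set i ((st.1.getD i []).set j v), max st.2 v)
  else st

-- 'for j in range(m): …' for one value of i
def aRow (park : List (List String)) (m : Nat) (st : List (List Int) × Int) (i : Nat) : List (List Int) × Int :=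
  (List.range m).foldl (aStep park i) st

def solution (mats : List Int) (park : List (List String)) : Int :=
  let n := park.length
  let m := (park.headD []).length
  let st := (List.range n).foldl (aRow park m) (List.replicate n (List.replicate m 0), 0)
  mats.foldl (fun acc mat => if mat ≤ st.2 then max acc mat else acc) (-1)

-- ===== PORT B =====
-- 'cur = [0]; for j in range(m): cur.append(cur[-1] + (1 if row[j] == "-1" else 0))'
def bRowPref (row : List String) (m : Nat) : List Int :=
  (List.range m).foldl
    (fun cur j => cur ++ [cur.getLastD 0 + (if row.getD j "" = "-1" then 1 else 0)]) [0]

-- 'S = [[0]*(m+1)]; for row in park: S.append([p + c for p, c in zip(S[-1], cur)])'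
def bTable (park : List (List String)) (m : Nat) : List (List Int) :=
  park.foldl (fun S row => S ++ [List.zipWith (· + ·) (S.getLastD []) (bRowPref row m)])
    [List.replicate (m+1) 0]

-- 'def fits(s): for i in range(s, n+1): for j in range(s, m+1): if <window> == s*s: return True; return False'
-- (range(a, b) is ported as List.range' a (b - a), exact for the Nat bounds used here)
def bFits (S : List (List Int)) (n m s : Nat) : Bool :=
  (List.range' s (n+1-s)).any fun i =>
    (List.range' s (m+1-s)).any fun j =>
      (S.getD i []).getD j 0 - (S.getD (i-s) []).getD j 0 - (S.getD i []).getD (j-s) 0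
        + (S.getD (i-s) []).getD (j-s) 0 = ((s : Int) * s)

-- 'best, s = 0, 1; while s <= min(n, m) and fits(s): best, s = s, s + 1'
def bLoop (S : List (List Int)) (n m : Nat) (s best : Nat) : Nat :=
  if h : s ≤ min n m ∧ bFits S n m s = true then bLoop S n m (s+1) s else best
termination_by min n m + 1 - s
decreasing_by omega

def solution_alt (mats : List Int) (park : List (List String)) : Int :=
  let m := (park.headD []).length
  let S := bTable park m
  let n := park.length
  let best : Int := (bLoop S n m 1 0 : Int)
  mats.foldl (fun ans mat => if ans < mat ∧ mat ≤ best then mat else ans) (-1)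

-- ===== PRECONDITION & SPEC =====
-- Pre_ excludes exactly the inputs where the Python A raises IndexError: empty park (park[0]) and
-- parks with a row shorter than the first row (park[i][j] for j < len(park[0])).
def Pre_solution (mats : List Int) (park : List (List String)) : Prop :=
  park ≠ [] ∧ ∀ row ∈ park, (park.headD []).length ≤ row.length
instance (mats : List Int) (park : List (List String)) : Decidable (Pre_solution mats park) := by
  unfold Pre_solution; infer_instance
def pvWitness_solution : List Int × List (List String) :=
  ([1, 3], [["-1", "-1"], ["-1", "0"]])

def Spec_solution (mats : List Int) (park : List (List String)) (out : Int) : Prop := out = solution_alt mats park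
instance (mats : List Int) (park : List (List String)) (out : Int) : Decidable (Spec_solution mats park out) := by unfold Spec_solution; infer_instance

-- ===== CLAIM (what is proved, stated in full; the proofs are below) =====
def Claim_equal_solution : Prop := ∀ (mats : List Int) (park : List (List String)), Dom_solution mats park → Pre_solution mats park → Spec_solution mats park (solution mats park)

-- ===== LEMMAS AND PROOFS =====

-- ---- generic list utilities ----
theorem getD_set' {α : Type} (l : List α) (j t : Nat) (v d : α) :
    (l.set j v).getD t d = if t = j ∧ j < l.length then v else l.getD t d := by
  by_cases h : t = j
  · subst h
    by_cases hl : t < l.length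
    · simp [List.getD_eq_getElem?_getD, hl]
    · simp [List.getD_eq_getElem?_getD, hl]
  · rw [List.getD_eq_getElem?_getD, List.getElem?_set_ne (fun hh => h hh.symm),
        ← List.getD_eq_getElem?_getD]
    simp [h]

theorem getD_replicate' {α : Type} (n t : Nat) (x d : α) :
    (List.replicate n x).getD t d = if t < n then x else d := by
  simp [List.getD_eq_getElem?_getD, List.getElem?_replicate]
  split <;> simp

theorem getD_map_range {α : Type} (k t : Nat) (f : Nat → α) (d : α) :
    (((List.range k).map f).getD t d) = if t < k then f t else d := by
  rw [List.getD_eq_getElem?_getD, List.getElem?_map]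
  by_cases h : t < k
  · simp [h]
  · simp [h]

theorem getLastD_map_range {α : Type} (k : Nat) (f : Nat → α) (d : α) :
    (((List.range (k+1)).map f).getLastD d) = f k := by
  rw [List.range_succ, List.map_append]
  simp

-- ---- availability, squares, the largest-square function g ----
-- cell (i,j) of the park is available
def avail (park : List (List String)) (i j : Nat) : Bool := (park.getD i []).getD j "" = "-1"

-- the s×s square of cells with exclusive bottom-right corner (i,j) is fully available
def sqrB (park : List (List String)) (i j s : Nat) : Bool :=
  decide (∀ r, r < i → ∀ c, c < j → i - s ≤ r → j - s ≤ c → avail park r c = true)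

-- s fits as a square side with bottom-right CELL (i,j)
def gB (park : List (List String)) (i j s : Nat) : Bool :=
  decide (s ≤ i+1) && decide (s ≤ j+1) && sqrB park (i+1) (j+1) s

-- side of the largest fully-available square whose bottom-right cell is (i,j)
def g (park : List (List String)) (i j : Nat) : Nat :=
  Nat.findGreatest (fun s => gB park i j s = true) (min (i+1) (j+1))

theorem sqrB_iff (park : List (List String)) (i j s : Nat) :
    sqrB park i j s = true ↔
      ∀ r, r < i → ∀ c, c < j → i - s ≤ r → j - s ≤ c → avail park r c = true := by
  simp [sqrB]

theorem sqrB_mono (park : List (List String)) (i j : Nat) {s' s : Nat} (h : s' ≤ s)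
    (hs : sqrB park i j s = true) : sqrB park i j s' = true := by
  rw [sqrB_iff] at hs ⊢
  intro r hr c hc h1 h2
  exact hs r hr c hc (by omega) (by omega)

theorem sqrB_split (park : List (List String)) (i j s : Nat) (hi : s ≤ i) (hj : s ≤ j) :
    sqrB park (i+1) (j+1) (s+1) = true ↔
      avail park i j = true ∧ sqrB park i (j+1) s = true ∧ sqrB park (i+1) j s = true ∧
        sqrB park i j s = true := by
  simp only [sqrB_iff]
  constructor
  · intro h
    refine ⟨h i (by omega) j (by omega) (by omega) (by omega), ?_, ?_, ?_⟩
    · intro r hr c hc h1 h2; exact h r (by omega) c hc (by omega) (by omega)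
    · intro r hr c hc h1 h2; exact h r hr c (by omega) (by omega) (by omega)
    · intro r hr c hc h1 h2; exact h r (by omega) c (by omega) (by omega) (by omega)
  · rintro ⟨ha, h1, h2, h3⟩ r hr c hc hr2 hc2
    by_cases hri : r = i
    · by_cases hcj : c = j
      · rw [hri, hcj]; exact ha
      · exact h2 r (by omega) c (by omega) (by omega) (by omega)
    · by_cases hcj : c = j
      · exact h1 r (by omega) c (by omega) (by omega) (by omega)
      · exact h3 r (by omega) c (by omega) (by omega) (by omega)

theorem gB_zero (park : List (List String)) (i j : Nat) : gB park i j 0 = true := by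
  have h : sqrB park (i+1) (j+1) 0 = true := by
    rw [sqrB_iff]; intro r hr c hc h1 h2; omega
  simp [gB, h]

theorem gB_mono (park : List (List String)) (i j : Nat) {s' s : Nat} (h : s' ≤ s)
    (hs : gB park i j s = true) : gB park i j s' = true := by
  simp only [gB, Bool.and_eq_true, decide_eq_true_eq] at hs ⊢
  exact ⟨⟨by omega, by omega⟩, sqrB_mono park _ _ h hs.2⟩

theorem le_g_iff (park : List (List String)) (i j s : Nat) :
    s ≤ g park i j ↔ gB park i j s = true := by
  constructor
  · intro hs
    rcases Nat.eq_zero_or_pos s with h0 | h1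
    · subst h0; exact gB_zero park i j
    · have hg : g park i j ≠ 0 := by omega
      have := Nat.findGreatest_of_ne_zero (P := fun s => gB park i j s = true) rfl hg
      exact gB_mono park i j hs this
  · intro hs
    have hb : s ≤ min (i+1) (j+1) := by
      simp only [gB, Bool.and_eq_true, decide_eq_true_eq] at hs
      omega
    exact Nat.le_findGreatest hb hs

theorem g_le (park : List (List String)) (i j : Nat) : g park i j ≤ min (i+1) (j+1) :=
  Nat.findGreatest_le _

-- g is 0 on unavailable cells
theorem g_not_avail (park : List (List String)) (i j : Nat) (h : avail park i j = false) :
    g park i j = 0 := by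
  by_contra hne
  have h1 : 1 ≤ g park i j := by omega
  rw [le_g_iff] at h1
  simp only [gB, Bool.and_eq_true, decide_eq_true_eq] at h1
  have := (sqrB_iff park (i+1) (j+1) 1).1 h1.2 i (by omega) j (by omega) (by omega) (by omega)
  rw [this] at h
  exact Bool.noConfusion h

-- A's recurrence, border case
theorem g_edge (park : List (List String)) (i j : Nat) (h : avail park i j = true)
    (h0 : i = 0 ∨ j = 0) : g park i j = 1 := by
  have h1 : 1 ≤ g park i j := by
    rw [le_g_iff]
    simp only [gB, Bool.and_eq_true, decide_eq_true_eq]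
    refine ⟨⟨by omega, by omega⟩, ?_⟩
    rw [sqrB_iff]
    intro r hr c hc h1 h2
    have : r = i ∧ c = j := by omega
    rw [this.1, this.2]; exact h
  have h2 : g park i j ≤ 1 := by
    by_contra hgt
    have : 2 ≤ g park i j := by omega
    rw [le_g_iff] at this
    simp only [gB, Bool.and_eq_true, decide_eq_true_eq] at this
    omega
  omega

-- A's recurrence, interior case
theorem g_inner (park : List (List String)) (i j : Nat) (h : avail park i j = true)
    (hi : 1 ≤ i) (hj : 1 ≤ j) :
    g park i j = min (min (g park (i-1) j) (g park i (j-1))) (g park (i-1) (j-1)) + 1 := by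
  set k := min (min (g park (i-1) j) (g park i (j-1))) (g park (i-1) (j-1)) with hk
  have hbound1 := g_le park (i-1) j
  have hbound2 := g_le park i (j-1)
  have hki : k ≤ i := by omega
  have hkj : k ≤ j := by omega
  have hlow : k + 1 ≤ g park i j := by
    rw [le_g_iff]
    simp only [gB, Bool.and_eq_true, decide_eq_true_eq]
    refine ⟨⟨by omega, by omega⟩, ?_⟩
    rw [sqrB_split park i j k hki hkj]
    have e1 : sqrB park i (j+1) k = true := by
      have := (le_g_iff park (i-1) j k).1 (by omega)
      simp only [gB, Bool.and_eq_true, decide_eq_true_eq] at this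
      have h' := this.2
      rwa [Nat.sub_add_cancel hi] at h'
    have e2 : sqrB park (i+1) j k = true := by
      have := (le_g_iff park i (j-1) k).1 (by omega)
      simp only [gB, Bool.and_eq_true, decide_eq_true_eq] at this
      have h' := this.2
      rwa [Nat.sub_add_cancel hj] at h'
    have e3 : sqrB park i j k = true := by
      have := (le_g_iff park (i-1) (j-1) k).1 (by omega)
      simp only [gB, Bool.and_eq_true, decide_eq_true_eq] at this
      have h' := this.2
      rwa [Nat.sub_add_cancel hi, Nat.sub_add_cancel hj] at h'
    exact ⟨h, e1, e2, e3⟩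
  have hhigh : g park i j ≤ k + 1 := by
    by_contra hgt
    have hs : k + 2 ≤ g park i j := by omega
    rw [le_g_iff] at hs
    simp only [gB, Bool.and_eq_true, decide_eq_true_eq] at hs
    have hsp := hs.2
    have hki1 : k + 1 ≤ i := by omega
    have hkj1 : k + 1 ≤ j := by omega
    rw [sqrB_split park i j (k+1) hki1 hkj1] at hsp
    obtain ⟨-, e1, e2, e3⟩ := hsp
    have b1 : k + 1 ≤ g park (i-1) j := by
      rw [le_g_iff]
      simp only [gB, Bool.and_eq_true, decide_eq_true_eq]
      refine ⟨⟨by omega, by omega⟩, ?_⟩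
      rwa [Nat.sub_add_cancel hi]
    have b2 : k + 1 ≤ g park i (j-1) := by
      rw [le_g_iff]
      simp only [gB, Bool.and_eq_true, decide_eq_true_eq]
      refine ⟨⟨by omega, by omega⟩, ?_⟩
      rwa [Nat.sub_add_cancel hj]
    have b3 : k + 1 ≤ g park (i-1) (j-1) := by
      rw [le_g_iff]
      simp only [gB, Bool.and_eq_true, decide_eq_true_eq]
      refine ⟨⟨by omega, by omega⟩, ?_⟩
      rwa [Nat.sub_add_cancel hi, Nat.sub_add_cancel hj]
    omega
  omega

-- ---- counting available cells: row counts, rectangle counts, the window argument ----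
-- number of available cells in row r among columns < j
def rcnt (park : List (List String)) (r j : Nat) : Nat :=
  ((Finset.range j).filter (fun c => avail park r c = true)).card

-- number of available cells in row r among columns in [a, b)
def segc (park : List (List String)) (r a b : Nat) : Nat :=
  ((Finset.Ico a b).filter (fun c => avail park r c = true)).card

-- number of available cells among rows < i, columns < j
def cnt (park : List (List String)) (i j : Nat) : Nat := ∑ r ∈ Finset.range i, rcnt park r j

theorem rcnt_split (park : List (List String)) (r j s : Nat) (h : s ≤ j) :
    rcnt park r j = rcnt park r (j-s) + segc park r (j-s) j := by
  unfold rcnt segc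
  rw [Finset.range_eq_Ico,
      ← Finset.Ico_union_Ico_eq_Ico (Nat.zero_le (j-s)) (by omega : j - s ≤ j),
      Finset.filter_union,
      Finset.card_union_of_disjoint
        (Finset.disjoint_filter_filter (Finset.Ico_disjoint_Ico_consecutive 0 (j-s) j))]

theorem cnt_split (park : List (List String)) (i j s : Nat) (h : s ≤ i) :
    cnt park i j = cnt park (i-s) j + ∑ r ∈ Finset.Ico (i-s) i, rcnt park r j := by
  unfold cnt
  rw [Finset.range_eq_Ico,
      ← Finset.sum_Ico_consecutive _ (Nat.zero_le (i-s)) (by omega : i - s ≤ i)]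

theorem segc_le (park : List (List String)) (r a b : Nat) : segc park r a b ≤ b - a := by
  unfold segc
  calc ((Finset.Ico a b).filter (fun c => avail park r c = true)).card
      ≤ (Finset.Ico a b).card := Finset.card_filter_le _ _
    _ = b - a := Nat.card_Ico a b

theorem segc_eq_iff (park : List (List String)) (r a b : Nat) :
    segc park r a b = b - a ↔ ∀ c, a ≤ c → c < b → avail park r c = true := by
  unfold segc
  rw [← Nat.card_Ico a b, Finset.card_filter_eq_iff]
  constructor
  · intro h c h1 h2; exact h c (Finset.mem_Ico.2 ⟨h1, h2⟩)
  · intro h c hc; exact h c (Finset.mem_Ico.1 hc).1 (Finset.mem_Ico.1 hc).2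

theorem window_eq_iff (park : List (List String)) (i j s : Nat)
    (h1 : 1 ≤ s) (hi : s ≤ i) (hj : s ≤ j) :
    ((cnt park i j : Int) - cnt park (i-s) j - cnt park i (j-s) + cnt park (i-s) (j-s)
      = (s : Int) * s) ↔ sqrB park i j s = true := by
  have e1 := cnt_split park i j s hi
  have e2 := cnt_split park i (j-s) s hi
  have e3 : ∑ r ∈ Finset.Ico (i-s) i, rcnt park r j
      = (∑ r ∈ Finset.Ico (i-s) i, rcnt park r (j-s))
        + ∑ r ∈ Finset.Ico (i-s) i, segc park r (j-s) j := by
    rw [← Finset.sum_add_distrib]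
    exact Finset.sum_congr rfl (fun r _ => rcnt_split park r j s hj)
  have lhs_eq : (cnt park i j : Int) - cnt park (i-s) j - cnt park i (j-s) + cnt park (i-s) (j-s)
      = ((∑ r ∈ Finset.Ico (i-s) i, segc park r (j-s) j : Nat) : Int) := by
    rw [e1, e2, e3]; push_cast; ring
  rw [lhs_eq]
  have cast_iff : (((∑ r ∈ Finset.Ico (i-s) i, segc park r (j-s) j : Nat) : Int) = (s : Int) * s)
      ↔ (∑ r ∈ Finset.Ico (i-s) i, segc park r (j-s) j = s * s) := by
    constructor
    · intro h; exact_mod_cast h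
    · intro h; exact_mod_cast congrArg (fun x : Nat => (x : Int)) h
  rw [cast_iff]
  have hcard : (Finset.Ico (i-s) i).card = s := by rw [Nat.card_Ico]; omega
  have hsegle : ∀ r, segc park r (j-s) j ≤ s := by
    intro r
    have := segc_le park r (j-s) j
    omega
  have sum_iff : (∑ r ∈ Finset.Ico (i-s) i, segc park r (j-s) j = s * s)
      ↔ ∀ r ∈ Finset.Ico (i-s) i, segc park r (j-s) j = s := by
    constructor
    · intro hsum
      by_contra hne
      push Not at hne
      obtain ⟨r, hr, hrne⟩ := hne
      have hlt : ∑ r ∈ Finset.Ico (i-s) i, segc park r (j-s) j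
          < ∑ _r ∈ Finset.Ico (i-s) i, s := by
        exact Finset.sum_lt_sum (fun x _ => hsegle x) ⟨r, hr, by have := hsegle r; omega⟩
      rw [Finset.sum_const, hcard, smul_eq_mul] at hlt
      omega
    · intro hall
      rw [Finset.sum_congr rfl hall, Finset.sum_const, hcard, smul_eq_mul]
  rw [sum_iff, sqrB_iff]
  constructor
  · intro h r hr c hc hr2 hc2
    have hseg := (segc_eq_iff park r (j-s) j).1 (by
      have := h r (Finset.mem_Ico.2 ⟨by omega, hr⟩)
      omega)
    exact hseg c (by omega) hc
  · intro h r hr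
    have hrm := Finset.mem_Ico.1 hr
    have hseg := (segc_eq_iff park r (j-s) j).2
      (fun c h1 h2 => h r hrm.2 c h2 (by omega) (by omega))
    omega

-- ---- correctness of B's prefix-sum table ----
theorem rcnt_succ (park : List (List String)) (r j : Nat) :
    rcnt park r (j+1) = rcnt park r j + (if avail park r j = true then 1 else 0) := by
  unfold rcnt
  rw [Finset.range_add_one, Finset.filter_insert]
  split
  · rw [Finset.card_insert_of_notMem (by simp)]
  · simp

theorem zipWith_map_same {α β γ δ : Type} (f : β → γ → δ) (g : α → β) (h : α → γ) (l : List α) :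
    List.zipWith f (l.map g) (l.map h) = l.map (fun x => f (g x) (h x)) := by
  induction l with
  | nil => rfl
  | cons a t ih => simp [ih]

theorem bRowPref_eq (park : List (List String)) (k m : Nat) :
    bRowPref (park.getD k []) m = (List.range (m+1)).map (fun j => (rcnt park k j : Int)) := by
  induction m with
  | zero =>
    simp [bRowPref, rcnt]
  | succ mm ih =>
    unfold bRowPref at ih ⊢
    rw [List.range_succ, List.foldl_append, ih, List.foldl_cons, List.foldl_nil]
    rw [getLastD_map_range]
    have hmap : (List.range (mm+1+1)).map (fun j => (rcnt park k j : Int))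
        = (List.range (mm+1)).map (fun j => (rcnt park k j : Int)) ++ [(rcnt park k (mm+1) : Int)] := by
      rw [List.range_succ, List.map_append]; rfl
    rw [hmap, rcnt_succ park k mm]
    congr 1
    congr 1
    by_cases hc : (park.getD k []).getD mm "" = "-1"
    · have hc2 : avail park k mm = true := by
        simp only [avail, decide_eq_true_eq]; exact hc
      rw [if_pos hc, if_pos hc2]
      push_cast
      ring
    · have hc2 : ¬ avail park k mm = true := by
        simp only [avail, decide_eq_true_eq]; exact hc
      rw [if_neg hc, if_neg hc2]
      push_cast
      ring

theorem cnt_zero (park : List (List String)) (j : Nat) : cnt park 0 j = 0 := by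
  simp [cnt]

theorem cnt_succ (park : List (List String)) (i j : Nat) :
    cnt park (i+1) j = cnt park i j + rcnt park i j := by
  unfold cnt
  rw [Finset.sum_range_succ]

theorem bTable_take (park : List (List String)) (m : Nat) :
    ∀ k, k ≤ park.length →
    (park.take k).foldl
        (fun S row => S ++ [List.zipWith (· + ·) (S.getLastD []) (bRowPref row m)])
        [List.replicate (m+1) 0]
      = (List.range (k+1)).map (fun i => (List.range (m+1)).map (fun j => (cnt park i j : Int))) := by
  intro k
  induction k with
  | zero =>
    intro _
    simp only [List.take_zero, List.foldl_nil]
    congr 1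
    simp [cnt_zero, List.map_const', List.length_range]
  | succ k ih =>
    intro hk1
    have hk : k < park.length := by omega
    have htake : park.take (k+1) = park.take k ++ [park.getD k []] := by
      rw [List.take_add_one, List.getElem?_eq_getElem hk]
      simp [List.getD_eq_getElem?_getD, List.getElem?_eq_getElem hk]
    rw [htake, List.foldl_append, ih (by omega), List.foldl_cons, List.foldl_nil]
    rw [getLastD_map_range, bRowPref_eq park k m, zipWith_map_same]
    rw [List.range_succ (n := k+1), List.map_append]
    congr 1
    simp only [List.map_cons, List.map_nil]
    congr 1
    apply List.map_congr_left
    intro j _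
    rw [cnt_succ]
    push_cast
    ring

theorem bTable_eq (park : List (List String)) (m : Nat) :
    bTable park m
      = (List.range (park.length+1)).map
          (fun i => (List.range (m+1)).map (fun j => (cnt park i j : Int))) := by
  have := bTable_take park m park.length (le_refl _)
  rw [List.take_length] at this
  exact this

-- ---- B's square test: fits(s) holds iff an s×s all-available square exists ----
-- a side-s square fits somewhere with corner inside the n×m grid
def OKp (park : List (List String)) (n m s : Nat) : Prop :=
  ∃ i, i ≤ n ∧ s ≤ i ∧ ∃ j, j ≤ m ∧ s ≤ j ∧ sqrB park i j s = true

theorem Stab_get (park : List (List String)) (m i j : Nat)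
    (hi : i ≤ park.length) (hj : j ≤ m) :
    ((bTable park m).getD i []).getD j 0 = (cnt park i j : Int) := by
  rw [bTable_eq, getD_map_range, if_pos (by omega), getD_map_range, if_pos (by omega)]

theorem bFits_iff (park : List (List String)) (m s : Nat) (h1 : 1 ≤ s) :
    bFits (bTable park m) park.length m s = true ↔ OKp park park.length m s := by
  unfold bFits OKp
  rw [List.any_eq_true]
  constructor
  · rintro ⟨i, hi, hinner⟩
    rw [List.any_eq_true] at hinner
    obtain ⟨j, hj, hcond⟩ := hinner
    rw [List.mem_range'_1] at hi hj
    have hii : i ≤ park.length := by omega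
    have hjj : j ≤ m := by omega
    rw [decide_eq_true_eq, Stab_get park m i j hii hjj,
        Stab_get park m (i-s) j (by omega) hjj,
        Stab_get park m i (j-s) hii (by omega),
        Stab_get park m (i-s) (j-s) (by omega) (by omega)] at hcond
    exact ⟨i, hii, hi.1, j, hjj, hj.1,
      (window_eq_iff park i j s h1 hi.1 hj.1).1 hcond⟩
  · rintro ⟨i, hii, hsi, j, hjj, hsj, hsq⟩
    refine ⟨i, List.mem_range'_1.2 ⟨hsi, by omega⟩, ?_⟩
    rw [List.any_eq_true]
    refine ⟨j, List.mem_range'_1.2 ⟨hsj, by omega⟩, ?_⟩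
    rw [decide_eq_true_eq, Stab_get park m i j hii hjj,
        Stab_get park m (i-s) j (by omega) hjj,
        Stab_get park m i (j-s) hii (by omega),
        Stab_get park m (i-s) (j-s) (by omega) (by omega)]
    exact (window_eq_iff park i j s h1 hsi hsj).2 hsq

-- ---- A's fold computes the maximum of g over the grid ----
def rowFold (park : List (List String)) (m a r : Nat) : Nat :=
  (List.range m).foldl (fun a c => max a (g park r c)) a

-- maximum of g over the n×m grid
def MAx (park : List (List String)) (n m : Nat) : Nat :=
  (List.range n).foldl (rowFold park m) 0

-- partial maximum: full rows < i plus columns < j of row i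
def PMx (park : List (List String)) (m i j : Nat) : Nat :=
  (List.range j).foldl (fun a c => max a (g park i c))
    ((List.range i).foldl (rowFold park m) 0)

-- the invariant tying A's loop state to g and the partial maximum
def AInv (park : List (List String)) (n m i j : Nat) (st : List (List Int) × Int) : Prop :=
  st.1.length = n ∧
  (∀ r, r < n → (st.1.getD r []).length = m) ∧
  (∀ r c, (st.1.getD r []).getD c 0
     = if (r < i ∨ (r = i ∧ c < j)) ∧ r < n ∧ c < m then (g park r c : Int) else 0) ∧
  st.2 = (PMx park m i j : Int)

theorem PMx_succ (park : List (List String)) (m i j : Nat) :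
    PMx park m i (j+1) = max (PMx park m i j) (g park i j) := by
  unfold PMx
  rw [List.range_succ, List.foldl_append, List.foldl_cons, List.foldl_nil]

theorem aStep_inv (park : List (List String)) (n m i j : Nat) (hi : i < n) (hj : j < m)
    (st : List (List Int) × Int) (h : AInv park n m i j st) :
    AInv park n m i (j+1) (aStep park i st j) := by
  obtain ⟨h1, h2, h3, h4⟩ := h
  unfold aStep
  by_cases hc : (park.getD i []).getD j "" = "-1"
  · rw [if_pos hc]
    have hav : avail park i j = true := by
      simp only [avail, decide_eq_true_eq]; exact hc
    have hvg : (if i = 0 ∨ j = 0 then (1:Int)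
        else min (min ((st.1.getD (i-1) []).getD j 0) ((st.1.getD i []).getD (j-1) 0))
                 ((st.1.getD (i-1) []).getD (j-1) 0) + 1) = (g park i j : Int) := by
      by_cases h0 : i = 0 ∨ j = 0
      · rw [if_pos h0, g_edge park i j hav h0]; rfl
      · push Not at h0
        have hi1 : 1 ≤ i := by omega
        have hj1 : 1 ≤ j := by omega
        rw [if_neg (by omega)]
        rw [h3 (i-1) j, h3 i (j-1), h3 (i-1) (j-1)]
        rw [if_pos ⟨by omega, by omega, by omega⟩, if_pos ⟨by omega, by omega, by omega⟩,
            if_pos ⟨by omega, by omega, by omega⟩]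
        rw [g_inner park i j hav hi1 hj1]
        push_cast
        omega
    rw [hvg]
    refine ⟨by simpa using h1, ?_, ?_, ?_⟩
    · intro r hr
      by_cases hri : r = i
      · subst hri
        rw [getD_set', if_pos ⟨rfl, by omega⟩, List.length_set]
        exact h2 r hr
      · rw [getD_set', if_neg (by omega)]
        exact h2 r hr
    · intro r c
      by_cases hri : r = i
      · subst hri
        rw [getD_set', if_pos ⟨rfl, by omega⟩, getD_set']
        by_cases hcj : c = j
        · subst hcj
          rw [if_pos ⟨rfl, by rw [h2 r hi]; omega⟩, if_pos ⟨by omega, by omega, by omega⟩]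
        · rw [if_neg (by omega), h3 r c]
          by_cases hcz : (r < r ∨ (r = r ∧ c < j)) ∧ r < n ∧ c < m
          · rw [if_pos hcz, if_pos ⟨by omega, by omega, by omega⟩]
          · rw [if_neg hcz, if_neg (by omega)]
      · rw [getD_set', if_neg (by omega), h3 r c]
        by_cases hcz : (r < i ∨ (r = i ∧ c < j)) ∧ r < n ∧ c < m
        · rw [if_pos hcz, if_pos (by omega)]
        · rw [if_neg hcz, if_neg (by omega)]
    · show max st.2 _ = _
      rw [h4, PMx_succ]
      push_cast
      omega
  · rw [if_neg hc]
    have hav : avail park i j = false := by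
      simp only [avail, decide_eq_false_iff_not]; exact hc
    have hg0 : g park i j = 0 := g_not_avail park i j hav
    refine ⟨h1, h2, ?_, ?_⟩
    · intro r c
      rw [h3 r c]
      by_cases hcz : (r < i ∨ (r = i ∧ c < j)) ∧ r < n ∧ c < m
      · rw [if_pos hcz, if_pos (by omega)]
      · by_cases hcz2 : (r < i ∨ (r = i ∧ c < j+1)) ∧ r < n ∧ c < m
        · have : r = i ∧ c = j := by omega
          rw [if_neg hcz, if_pos hcz2, this.1, this.2, hg0]
          rfl
        · rw [if_neg hcz, if_neg hcz2]
    · rw [h4, PMx_succ, hg0]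
      simp

theorem aRow_inv (park : List (List String)) (n m i : Nat) (hi : i < n)
    (st : List (List Int) × Int) (h : AInv park n m i 0 st) :
    ∀ j, j ≤ m → AInv park n m i j ((List.range j).foldl (aStep park i) st) := by
  intro j
  induction j with
  | zero => intro _; simpa using h
  | succ j ih =>
    intro hj1
    rw [List.range_succ, List.foldl_append, List.foldl_cons, List.foldl_nil]
    exact aStep_inv park n m i j hi (by omega) _ (ih (by omega))

theorem inv_next_row (park : List (List String)) (n m i : Nat)
    (st : List (List Int) × Int) (h : AInv park n m i m st) :
    AInv park n m (i+1) 0 st := by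
  obtain ⟨h1, h2, h3, h4⟩ := h
  refine ⟨h1, h2, ?_, ?_⟩
  · intro r c
    rw [h3 r c]
    by_cases hcz : (r < i ∨ (r = i ∧ c < m)) ∧ r < n ∧ c < m
    · rw [if_pos hcz, if_pos (by omega)]
    · rw [if_neg hcz, if_neg (by omega)]
  · rw [h4]
    unfold PMx
    rw [List.range_succ, List.foldl_append, List.foldl_cons, List.foldl_nil, List.range_zero,
        List.foldl_nil]
    rfl

theorem aOuter_inv (park : List (List String)) (n m : Nat) :
    ∀ i, i ≤ n → AInv park n m i 0
      ((List.range i).foldl (aRow park m)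
        (List.replicate n (List.replicate m 0), 0)) := by
  intro i
  induction i with
  | zero =>
    intro _
    simp only [List.range_zero, List.foldl_nil]
    refine ⟨by simp, ?_, ?_, by simp [PMx]⟩
    · intro r hr
      rw [getD_replicate', if_pos hr, List.length_replicate]
    · intro r c
      rw [getD_replicate']
      by_cases hr : r < n
      · rw [if_pos hr, getD_replicate']
        by_cases hcm : c < m
        · rw [if_pos hcm, if_neg (by omega)]
        · rw [if_neg hcm, if_neg (by omega)]
      · rw [if_neg hr, if_neg (by omega)]
        rfl
  | succ i ih =>
    intro hi1
    rw [List.range_succ, List.foldl_append, List.foldl_cons, List.foldl_nil]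
    unfold aRow
    exact inv_next_row park n m i _
      (aRow_inv park n m i (by omega) _ (ih (by omega)) m (le_refl m))

theorem a_fold_max (park : List (List String)) (n m : Nat) :
    ((List.range n).foldl (aRow park m) (List.replicate n (List.replicate m 0), 0)).2
      = (MAx park n m : Int) := by
  have := (aOuter_inv park n m n (le_refl n)).2.2.2
  rw [this]
  rfl

-- ---- the maximum of g is attained and bounds g ----
theorem le_foldl_max_nat' (l : List Nat) (f : Nat → Nat) (a : Nat) :
    a ≤ l.foldl (fun a c => max a (f c)) a ∧
      ∀ x ∈ l, f x ≤ l.foldl (fun a c => max a (f c)) a := by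
  induction l generalizing a with
  | nil => simp
  | cons x t ih =>
    refine ⟨le_trans (le_max_left a (f x)) (ih (max a (f x))).1, ?_⟩
    intro y hy
    rcases List.mem_cons.1 hy with h | h
    · subst h
      exact le_trans (le_max_right a (f y)) (ih (max a (f y))).1
    · exact (ih (max a (f x))).2 y h

theorem foldl_max_nat_mem (l : List Nat) (f : Nat → Nat) (a : Nat) :
    l.foldl (fun a c => max a (f c)) a = a ∨
      ∃ x ∈ l, l.foldl (fun a c => max a (f c)) a = f x := by
  induction l generalizing a with
  | nil => left; rfl
  | cons x t ih =>
    rcases ih (max a (f x)) with h | ⟨y, hy, hys⟩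
    · simp only [List.foldl_cons]
      rcases Nat.le_total a (f x) with hle | hle
      · right
        exact ⟨x, List.mem_cons_self, by rw [h]; omega⟩
      · left
        rw [h]; omega
    · right
      exact ⟨y, List.mem_cons_of_mem x hy, hys⟩

theorem foldl_max_shift (f : Nat → Nat) (l : List Nat) :
    ∀ a b : Nat, l.foldl (fun x c => max x (f c)) (max a b) = max a (l.foldl (fun x c => max x (f c)) b) := by
  induction l with
  | nil => intro a b; rfl
  | cons x t ih =>
    intro a b
    simp only [List.foldl_cons]
    rw [Nat.max_assoc, ih]

theorem rowFold_shift (park : List (List String)) (m a r : Nat) :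
    rowFold park m a r = max a (rowFold park m 0 r) := by
  unfold rowFold
  rw [← foldl_max_shift]
  norm_num

theorem MAx_eq (park : List (List String)) (n m : Nat) :
    MAx park n m = (List.range n).foldl (fun a r => max a (rowFold park m 0 r)) 0 := by
  unfold MAx
  congr 1
  funext a r
  exact rowFold_shift park m a r

theorem g_le_MAx (park : List (List String)) (n m i j : Nat) (hi : i < n) (hj : j < m) :
    g park i j ≤ MAx park n m := by
  rw [MAx_eq]
  have h1 := (le_foldl_max_nat' (List.range n) (rowFold park m 0) 0).2 i (List.mem_range.2 hi)
  have h2 := (le_foldl_max_nat' (List.range m) (g park i) 0).2 j (List.mem_range.2 hj)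
  exact le_trans h2 h1

theorem MAx_attained (park : List (List String)) (n m : Nat) :
    MAx park n m = 0 ∨ ∃ i, i < n ∧ ∃ j, j < m ∧ g park i j = MAx park n m := by
  rw [MAx_eq]
  rcases foldl_max_nat_mem (List.range n) (rowFold park m 0) 0 with h | ⟨i, hi, hieq⟩
  · left; exact h
  · rcases foldl_max_nat_mem (List.range m) (g park i) 0 with h2 | ⟨j, hj, hjeq⟩
    · left
      rw [hieq]
      exact h2
    · right
      refine ⟨i, List.mem_range.1 hi, j, List.mem_range.1 hj, ?_⟩
      rw [hieq]
      exact hjeq.symm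

-- ---- relating OKp to the maximum of g ----
theorem MAx_le_min (park : List (List String)) (n m : Nat) : MAx park n m ≤ min n m := by
  rcases MAx_attained park n m with h | ⟨i, hi, j, hj, hg⟩
  · omega
  · have := g_le park i j
    omega

theorem okp_iff (park : List (List String)) (n m s : Nat) (h1 : 1 ≤ s) :
    OKp park n m s ↔ s ≤ MAx park n m := by
  constructor
  · rintro ⟨i, hii, hsi, j, hjj, hsj, hsq⟩
    have hgb : gB park (i-1) (j-1) s = true := by
      simp only [gB, Bool.and_eq_true, decide_eq_true_eq]
      refine ⟨⟨by omega, by omega⟩, ?_⟩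
      have e1 : i - 1 + 1 = i := by omega
      have e2 : j - 1 + 1 = j := by omega
      rw [e1, e2]
      exact hsq
    have := (le_g_iff park (i-1) (j-1) s).2 hgb
    have := g_le_MAx park n m (i-1) (j-1) (by omega) (by omega)
    omega
  · intro hs
    rcases MAx_attained park n m with h | ⟨i, hi, j, hj, hg⟩
    · omega
    · have hsg : s ≤ g park i j := by omega
      rw [le_g_iff] at hsg
      simp only [gB, Bool.and_eq_true, decide_eq_true_eq] at hsg
      exact ⟨i+1, by omega, by omega, j+1, by omega, by omega, hsg.2⟩

-- ---- correctness of B's ascending while loop ----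
theorem bLoop_eq (park : List (List String)) (m : Nat) :
    ∀ d s, 1 ≤ s → s ≤ MAx park park.length m + 1 →
      MAx park park.length m + 1 - s ≤ d →
      bLoop (bTable park m) park.length m s (s-1) = MAx park park.length m := by
  intro d
  induction d with
  | zero =>
    intro s hs1 hs2 hd
    have hse : s = MAx park park.length m + 1 := by omega
    rw [bLoop, dif_neg]
    · omega
    · rintro ⟨hle, hf⟩
      have := (okp_iff park park.length m s hs1).1 ((bFits_iff park m s hs1).1 hf)
      omega
  | succ d ih =>
    intro s hs1 hs2 hd
    by_cases hse : s = MAx park park.length m + 1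
    · rw [bLoop, dif_neg]
      · omega
      · rintro ⟨hle, hf⟩
        have := (okp_iff park park.length m s hs1).1 ((bFits_iff park m s hs1).1 hf)
        omega
    · have hsM : s ≤ MAx park park.length m := by omega
      have hok : OKp park park.length m s := (okp_iff park park.length m s hs1).2 hsM
      have hfit : bFits (bTable park m) park.length m s = true := (bFits_iff park m s hs1).2 hok
      have hmin := MAx_le_min park park.length m
      rw [bLoop, dif_pos ⟨by omega, hfit⟩]
      have := ih (s+1) (by omega) (by omega) (by omega)
      simpa using this

theorem bLoop_result (park : List (List String)) (m : Nat) :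
    bLoop (bTable park m) park.length m 1 0 = MAx park park.length m := by
  have := bLoop_eq park m (MAx park park.length m + 1) 1 (by omega) (by omega) (by omega)
  simpa using this

-- ---- the two mat-selection loops agree ----
theorem mats_fold_eq (M : Int) (mats : List Int) :
    ∀ acc : Int,
      mats.foldl (fun acc mat => if mat ≤ M then max acc mat else acc) acc
        = mats.foldl (fun ans mat => if ans < mat ∧ mat ≤ M then mat else ans) acc := by
  induction mats with
  | nil => intro acc; rfl
  | cons x xs ih =>
    intro acc
    simp only [List.foldl_cons]
    have : (if x ≤ M then max acc x else acc) = (if acc < x ∧ x ≤ M then x else acc) := by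
      split_ifs <;> omega
    rw [this]
    exact ih _

-- ===== VERDICT (by name: the statement is the Claim_ definition above) =====
theorem solution_spec : Claim_equal_solution := by
  intro mats park _ _
  unfold Spec_solution
  simp only [solution, solution_alt]
  rw [a_fold_max park park.length (park.headD []).length,
      bLoop_result park (park.headD []).length]
  exact mats_fold_eq _ mats _
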